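-- pv_equiv track=rewrite | github.com/serdarselcuk/pythonStudy | leetcode/461. Hamming-Distance.PY | modul
-- ===== SOURCE A (Python) =====
-- def modul(m,x):
--         num = []
--         while x > 0:
--                 a = 0
--                 while m**(a+1) <= x:
--                         a +=1
--                 num.append(a)
--                 x = x-m**a
--         return num
-- ===== SOURCE B (Python) =====
-- def modul(m, x):
--     num = []
--     if x <= 0:
--         return num
--     pows = [1]  # descending powers of m, largest first
--     while m * pows[0] <= x:
--         pows = [m * pows[0]] + pows
--     while x > 0:
--         if pows[0] > x:
--             pows = pows[1:]
--         else:
--             num.append(len(pows) - 1)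
--             x -= pows[0]
--     return num
-- ===== Notes on version B (the rewrite author's own statement) =====
-- stated objective: alternative
-- what changed: B precomputes the descending list of powers of m once and walks it with a shrinking stack, instead of A's per-step inner search that recomputes m**a by exponentiation from scratch.
import Mathlib
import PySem

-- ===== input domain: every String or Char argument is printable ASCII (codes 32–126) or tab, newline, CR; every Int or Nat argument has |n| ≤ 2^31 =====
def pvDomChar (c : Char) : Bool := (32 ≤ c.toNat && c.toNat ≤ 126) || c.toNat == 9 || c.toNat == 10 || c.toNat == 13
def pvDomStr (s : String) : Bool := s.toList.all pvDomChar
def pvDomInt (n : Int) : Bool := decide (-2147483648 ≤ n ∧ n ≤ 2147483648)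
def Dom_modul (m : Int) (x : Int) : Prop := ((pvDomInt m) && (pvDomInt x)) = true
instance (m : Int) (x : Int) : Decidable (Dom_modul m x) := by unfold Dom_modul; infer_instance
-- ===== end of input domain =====

-- B replaces A's per-step inner exponentiation search by a precomputed descending
-- stack of powers of m that is consumed as x shrinks (objective: alternative).

-- ===== PORT A =====
-- inner 'while m**(a+1) <= x: a += 1'; fuel bounds the (under Pre_ terminating) loop
def modulInnerA (m x : Int) (a : Nat) (fuel : Nat) : Nat :=
  match fuel with
  | 0 => a
  | f+1 => if m ^ (a+1) ≤ x then modulInnerA m x (a+1) f else a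

-- outer 'while x > 0' loop with accumulator num
def modulOuterA (m x : Int) (num : List Int) (fuel : Nat) : List Int :=
  match fuel with
  | 0 => num
  | f+1 =>
    if 0 < x then
      let a := modulInnerA m x 0 x.toNat
      modulOuterA m (x - m ^ a) (num ++ [(a : Int)]) f
    else num

def modul (m : Int) (x : Int) : List Int := modulOuterA m x [] (x.toNat + 1)

-- ===== PORT B =====
-- 'while m * pows[0] <= x: pows = [m*pows[0]] + pows' (pows nonempty throughout)
def altGrow (m x : Int) (pows : List Int) (fuel : Nat) : List Int :=
  match fuel with
  | 0 => pows
  | f+1 =>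
    match pows with
    | [] => pows
    | p :: _ => if m * p ≤ x then altGrow m x ((m * p) :: pows) f else pows

-- 'while x > 0: if pows[0] > x: pows = pows[1:] else: append len-1; x -= pows[0]'
def altLoop (x : Int) (pows : List Int) (num : List Int) (fuel : Nat) : List Int :=
  match fuel with
  | 0 => num
  | f+1 =>
    if 0 < x then
      match pows with
      | [] => num
      | p :: rest =>
        if x < p then altLoop x rest num f
        else altLoop (x - p) (p :: rest) (num ++ [((p :: rest).length : Int) - 1]) f
    else num

def modul_alt (m : Int) (x : Int) : List Int :=
  if x ≤ 0 then []
  else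
    let pows := altGrow m x [1] x.toNat
    altLoop x pows [] (x.toNat + pows.length + 1)

-- ===== PRECONDITION & SPEC =====
-- Pre_ excludes exactly the inputs (m ≤ 1 with x > 0) on which Python A diverges
-- (its inner/outer loops never exit); A returns normally on all of Pre_.
def Pre_modul (m : Int) (x : Int) : Prop := 2 ≤ m ∨ x ≤ 0
instance (m : Int) (x : Int) : Decidable (Pre_modul m x) := by unfold Pre_modul; infer_instance
def pvWitness_modul : Int × Int := (2, 10)

def Spec_modul (m : Int) (x : Int) (out : List Int) : Prop := out = modul_alt m x
instance (m : Int) (x : Int) (out : List Int) : Decidable (Spec_modul m x out) := by unfold Spec_modul; infer_instance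

-- ===== CLAIM (what is proved, stated in full; the proofs are below) =====
def Claim_equal_modul : Prop := ∀ (m : Int) (x : Int), Dom_modul m x → Pre_modul m x → Spec_modul m x (modul m x)

-- ===== LEMMAS AND PROOFS =====

-- the descending power stack [m^k, …, m^1, 1]
def descPows (m : Int) : Nat → List Int
  | 0 => [1]
  | k+1 => m ^ (k+1) :: descPows m k

-- the common greedy reference: append the canonical exponent, recurse on the remainder
def greedyRef (m x : Int) (fuel : Nat) : List Int :=
  match fuel with
  | 0 => []
  | f+1 =>
    if 0 < x then
      let a := modulInnerA m x 0 x.toNat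
      (a : Int) :: greedyRef m (x - m ^ a) f
    else []

theorem descPows_length (m : Int) (k : Nat) : (descPows m k).length = k + 1 := by
  induction k with
  | zero => rfl
  | succ k ih => simp [descPows, ih]

theorem one_le_pow_of_two_le {m : Int} (hm : 2 ≤ m) (k : Nat) : 1 ≤ m ^ k :=
  one_le_pow₀ (by omega)

theorem pow_lt_pow_of_lt {m : Int} (hm : 2 ≤ m) {j k : Nat} (h : j < k) :
    m ^ (j+1) ≤ m ^ k :=
  pow_le_pow_right₀ (by omega) (by omega)

theorem x_lt_pow_toNat {m x : Int} (hm : 2 ≤ m) : x < m ^ (x.toNat + 1) := by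
  have h1 : x ≤ (x.toNat : Int) := Int.self_le_toNat x
  have h2 : x.toNat < 2 ^ (x.toNat + 1) :=
    lt_of_lt_of_le (Nat.lt_two_pow_self) (Nat.pow_le_pow_right (by omega) (by omega))
  have h3 : ((x.toNat : Int)) < (2:Int) ^ (x.toNat + 1) := by exact_mod_cast h2
  have h4 : (2:Int) ^ (x.toNat + 1) ≤ m ^ (x.toNat + 1) :=
    pow_le_pow_left₀ (by norm_num) hm _
  omega

-- the canonical exponent property
theorem innerA_good {m x : Int} (_hm : 2 ≤ m) :
    ∀ (fuel a : Nat), m ^ a ≤ x → x < m ^ (a + fuel + 1) →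
      m ^ (modulInnerA m x a fuel) ≤ x ∧ x < m ^ (modulInnerA m x a fuel + 1) := by
  intro fuel
  induction fuel with
  | zero =>
    intro a h1 h2
    exact ⟨h1, by simpa using h2⟩
  | succ f ih =>
    intro a h1 h2
    by_cases hc : m ^ (a+1) ≤ x
    · have := ih (a+1) hc (by
        have : a + 1 + f + 1 = a + (f+1) + 1 := by omega
        rw [this]; exact h2)
      simpa [modulInnerA, hc] using this
    · simp only [modulInnerA, hc, if_false]
      exact ⟨h1, by omega⟩

theorem good_unique {m x : Int} (hm : 2 ≤ m) {j k : Nat}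
    (hj1 : m ^ j ≤ x) (hj2 : x < m ^ (j+1))
    (hk1 : m ^ k ≤ x) (hk2 : x < m ^ (k+1)) : j = k := by
  by_contra hne
  rcases Nat.lt_or_lt_of_ne hne with h | h
  · have := pow_lt_pow_of_lt hm h
    omega
  · have := pow_lt_pow_of_lt hm h
    omega

theorem innerA_good0 {m x : Int} (hm : 2 ≤ m) (hx : 0 < x) :
    m ^ (modulInnerA m x 0 x.toNat) ≤ x ∧ x < m ^ (modulInnerA m x 0 x.toNat + 1) := by
  apply innerA_good hm x.toNat 0
  · simp only [pow_zero]; omega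
  · simpa using x_lt_pow_toNat hm (x := x)

-- greedyRef is fuel-irrelevant above x.toNat (x drops by ≥ 1 each step when 2 ≤ m)
theorem greedyRef_fuel {m : Int} (hm : 2 ≤ m) :
    ∀ (f : Nat) (x : Int), x.toNat ≤ f → greedyRef m x f = greedyRef m x x.toNat := by
  intro f
  induction f using Nat.strong_induction_on with
  | _ f ih =>
    intro x h
    match f with
    | 0 =>
      have : x.toNat = 0 := by omega
      rw [this]
    | f+1 =>
      by_cases hx : 0 < x
      · obtain ⟨t, ht⟩ : ∃ t, x.toNat = t + 1 := ⟨x.toNat - 1, by omega⟩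
        have hp := one_le_pow_of_two_le hm (modulInnerA m x 0 x.toNat)
        have hd : (x - m ^ modulInnerA m x 0 x.toNat).toNat ≤ t := by omega
        have l1 : greedyRef m x (f+1) =
            ((modulInnerA m x 0 x.toNat : Nat) : Int) ::
              greedyRef m (x - m ^ modulInnerA m x 0 x.toNat) f := by
          simp only [greedyRef, hx, if_true]
        have l2 : greedyRef m x x.toNat =
            ((modulInnerA m x 0 x.toNat : Nat) : Int) ::
              greedyRef m (x - m ^ modulInnerA m x 0 x.toNat) t := by
          rw [ht]
          simp only [greedyRef, hx, if_true]
          rw [← ht]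
        rw [l1, l2, ih f (by omega) _ (by omega), ih t (by omega) _ hd]
      · have h0 : x.toNat = 0 := by omega
        rw [h0]
        simp [greedyRef, hx]

theorem modulOuterA_eq_greedy (m : Int) :
    ∀ (fuel : Nat) (x : Int) (num : List Int),
      modulOuterA m x num fuel = num ++ greedyRef m x fuel := by
  intro fuel
  induction fuel with
  | zero => intro x num; simp [modulOuterA, greedyRef]
  | succ f ih =>
    intro x num
    by_cases hx : 0 < x
    · simp only [modulOuterA, greedyRef, hx, if_true]
      rw [ih]
      simp
    · simp [modulOuterA, greedyRef, hx]

theorem altGrow_desc {m x : Int} (_hm : 2 ≤ m) :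
    ∀ (f k : Nat), m ^ k ≤ x → x < m ^ (k + f + 1) →
      ∃ r, altGrow m x (descPows m k) f = descPows m r ∧ m ^ r ≤ x ∧ x < m ^ (r+1) := by
  intro f
  induction f with
  | zero =>
    intro k h1 h2
    exact ⟨k, rfl, h1, by simpa using h2⟩  
  | succ f ih =>
    intro k h1 h2
    have hhead : ∃ rest, descPows m k = m ^ k :: rest := by
      cases k with
      | zero => exact ⟨[], by norm_num [descPows]⟩
      | succ k => exact ⟨descPows m k, rfl⟩
    obtain ⟨rest, hr⟩ := hhead
    by_cases hc : m * m ^ k ≤ x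
    · have hk1 : m ^ (k+1) ≤ x := by
        rw [pow_succ]; rw [mul_comm] at hc; exact hc
      have := ih (k+1) hk1 (by
        have : k + 1 + f + 1 = k + (f+1) + 1 := by omega
        rw [this]; exact h2)
      rw [hr]
      simp only [altGrow, hc, if_true]
      have hcons : (m * m ^ k) :: m ^ k :: rest = descPows m (k+1) := by
        rw [← hr]
        simp [descPows, pow_succ, mul_comm]
      rw [hcons]
      exact this
    · rw [hr]
      simp only [altGrow, hc, if_false]
      refine ⟨k, hr.symm, h1, ?_⟩
      have hps : m ^ (k+1) = m * m ^ k := by rw [pow_succ, mul_comm]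
      omega

theorem altLoop_eq_greedy {m : Int} (hm : 2 ≤ m) :
    ∀ (f : Nat) (x : Int) (k : Nat) (num : List Int),
      0 ≤ x → x < m ^ (k+1) → x.toNat + (k+1) ≤ f →
      altLoop x (descPows m k) num f = num ++ greedyRef m x x.toNat := by
  intro f
  induction f with
  | zero => intro x k num _ _ h; omega
  | succ f ih =>
    intro x k num hx0 hxk hfuel
    by_cases hx : 0 < x
    · by_cases hc : x < m ^ k
      · -- pop: k must be ≥ 1 since m^0 = 1 ≤ x
        cases k with
        | zero => simp at hc; omega
        | succ k' =>
          simp only [descPows, altLoop, hx, if_true, hc, if_true]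
          exact ih x k' num hx0 hc (by omega)
      · -- use head
        rw [not_lt] at hc
        have hgood := innerA_good0 hm hx
        have hak : modulInnerA m x 0 x.toNat = k := good_unique hm hgood.1 hgood.2 hc hxk
        have hp : 1 ≤ m ^ k := one_le_pow_of_two_le hm k
        have hcons : ∃ rest, descPows m k = m ^ k :: rest ∧ (m ^ k :: rest).length = k + 1 := by
          cases k with
          | zero => exact ⟨[], by norm_num [descPows], rfl⟩
          | succ k => exact ⟨descPows m k, rfl, by simpa [descPows] using descPows_length m (k+1)⟩
        obtain ⟨rest, hr, hlen⟩ := hcons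
        rw [hr]
        simp only [altLoop, hx, if_true]
        have hnotlt : ¬ x < m ^ k := by omega
        simp only [hnotlt, if_false]
        obtain ⟨t, ht⟩ : ∃ t, x.toNat = t + 1 := ⟨x.toNat - 1, by omega⟩
        have hx'0 : 0 ≤ x - m ^ k := by omega
        have hx'lt : x - m ^ k < m ^ (k+1) := by omega
        have hx't : (x - m ^ k).toNat ≤ t := by omega
        have lhs := ih (x - m ^ k) k (num ++ [((m ^ k :: rest).length : Int) - 1]) hx'0 hx'lt (by omega)
        rw [hr] at lhs
        rw [lhs]
        have rhs : greedyRef m x x.toNat = (k : Int) :: greedyRef m (x - m ^ k) t := by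
          rw [ht]
          simp only [greedyRef, hx, if_true]
          rw [hak]
        rw [rhs]
        rw [greedyRef_fuel hm t _ hx't, hlen]
        simp
    · have hx0' : x.toNat = 0 := by omega
      cases k with
      | zero => simp [altLoop, hx, hx0', greedyRef]
      | succ k => simp [altLoop, hx, hx0', greedyRef]

-- ===== VERDICT (by name: the statement is the Claim_ definition above) =====
theorem modul_spec : Claim_equal_modul := by
  intro m x _ hpre
  unfold Spec_modul modul modul_alt
  by_cases hx : 0 < x
  · have hm : 2 ≤ m := by
      rcases hpre with h | h
      · exact h
      · omega
    have hle : ¬ x ≤ 0 := by omega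
    simp only [hle, if_false]
    obtain ⟨r, hgrow, hr1, hr2⟩ := altGrow_desc (m := m) (x := x) hm x.toNat 0
      (by simp only [pow_zero]; omega) (by simp only [Nat.zero_add]; exact x_lt_pow_toNat hm)
    have h1 : altGrow m x [1] x.toNat = descPows m r := by
      simpa [descPows] using hgrow
    rw [h1]
    rw [altLoop_eq_greedy hm _ x r [] hx.le hr2 (by simp [descPows_length])]
    rw [modulOuterA_eq_greedy]
    rw [greedyRef_fuel hm (x.toNat + 1) x (by omega)]
  · have hle : x ≤ 0 := by omega
    simp only [hle, if_true]
    rw [modulOuterA_eq_greedy]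
    simp [greedyRef, hx]
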